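-- pv_equiv track=rewrite | github.com/maria-pugacheva/LeetCode | src/python/_01_easy/_2544_alternating-digit-sum.py | solution
-- ===== SOURCE A (Python) =====
-- def solution(n: int) -> int:
--     """Given a positive integer n, each digit of n has a sign according
--     to the following rules: the most significant digit is assigned a
--     positive sign and each other digit has an opposite sign to its
--     adjacent digits. Return the sum of all the digits in n.
--
--     Examples:
--         >>> solution(1)
--         1
--         >>> solution(521)
--         4
--         >>> solution(111)
--         1
--         >>> solution(886996)
--         0
--         >>> solution(886998)
--         -2
--     """
--     res, cnt, sign = 0, 0, 1
--     while n:
--         res += (n % 10) * sign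
--         n //= 10
--         sign *= -1
--         cnt += 1
--     return res if cnt & 1 else -res
-- ===== SOURCE B (Python) =====
-- def solution(n: int) -> int:
--     total = 0
--     for i, c in enumerate(str(n)):
--         d = ord(c) - 48
--         total += d if i % 2 == 0 else -d
--     return total
-- ===== Notes on version B (the rewrite author's own statement) =====
-- stated objective: simpler
-- what changed: B iterates over the decimal string of n most-significant-first with enumerate and a fixed starting sign, instead of A's mod/div loop that extracts digits least-significant-first and flips the result by the digit-count parity.
-- outside the precondition, e.g. on solution(-1): A does not finish within the time limit, B returns -4
import Mathlib
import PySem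

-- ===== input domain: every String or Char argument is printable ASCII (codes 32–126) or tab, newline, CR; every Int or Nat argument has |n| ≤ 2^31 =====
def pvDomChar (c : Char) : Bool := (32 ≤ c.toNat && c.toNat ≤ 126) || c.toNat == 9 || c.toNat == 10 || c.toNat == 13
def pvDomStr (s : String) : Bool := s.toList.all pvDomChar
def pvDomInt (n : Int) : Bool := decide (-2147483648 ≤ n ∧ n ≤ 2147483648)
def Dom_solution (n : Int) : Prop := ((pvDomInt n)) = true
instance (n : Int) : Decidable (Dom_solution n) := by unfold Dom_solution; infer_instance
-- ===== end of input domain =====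

-- B iterates over str(n) most-significant-first with enumerate instead of A's mod/div loop
-- plus count-parity flip: a simpler single pass with a fixed starting sign (objective: simpler).

-- ===== PORT A =====
-- Python's `while n` loops forever for n < 0 (n //= 10 stabilises at -1), so the loop is
-- guarded with 0 < n (equal to n ≠ 0 on the admitted domain 0 ≤ n) to make it total;
-- Pre_solution excludes the diverging negative inputs.
def solLoop (n res cnt sign : Int) : Int :=
  if _h : 0 < n then
    solLoop (PySem.Int.floordiv n 10) (res + PySem.Int.mod n 10 * sign) (cnt + 1) (sign * -1)
  else
    -- return res if cnt & 1 else -res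
    if PySem.Int.band cnt 1 ≠ 0 then res else -res
termination_by n.toNat
decreasing_by
  rw [PySem.Int.floordiv_eq_ediv_of_pos (by omega : (0:Int) < 10)]
  omega

def solution (n : Int) : Int := solLoop n 0 0 1

-- ===== PORT B =====
def solution_alt (n : Int) : Int :=
  (PySem.List.enumerate (PySem.Int.toStr n).toList 0).foldl
    (fun total p =>
      total + (if PySem.Int.mod p.1 2 = 0 then ((p.2.toNat : Int) - 48)
               else -((p.2.toNat : Int) - 48)))
    0

-- ===== PRECONDITION & SPEC =====
-- Pre_ excludes n < 0, on which Python A never returns (the while loop diverges).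
def Pre_solution (n : Int) : Prop := 0 ≤ n
instance (n : Int) : Decidable (Pre_solution n) := by unfold Pre_solution; infer_instance
def pvWitness_solution : Int := (886998)
def Spec_solution (n : Int) (out : Int) : Prop := out = solution_alt n
instance (n : Int) (out : Int) : Decidable (Spec_solution n out) := by unfold Spec_solution; infer_instance

-- ===== CLAIM (what is proved, stated in full; the proofs are below) =====
def Claim_equal_solution : Prop := ∀ (n : Int), Dom_solution n → Pre_solution n → Spec_solution n (solution n)

-- ===== LEMMAS AND PROOFS =====

/-- Alternating sum of a digit list, first element positive. -/
def altSum : List Int → Int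
  | [] => 0
  | d :: ds => d - altSum ds

/-- Digits of a natural number, least significant first (A's traversal order). -/
def digitsLow (m : Nat) : List Int :=
  if m = 0 then [] else ((m % 10 : Nat) : Int) :: digitsLow (m / 10)
decreasing_by exact Nat.div_lt_self (by omega) (by omega)

/-- Decimal digit characters of a natural number, most significant first
(the shape `Nat.toDigitsCore` produces). -/
def digitChars (m : Nat) : List Char :=
  if m / 10 = 0 then [Nat.digitChar (m % 10)]
  else digitChars (m / 10) ++ [Nat.digitChar (m % 10)]
decreasing_by exact Nat.div_lt_self (by omega) (by omega)

lemma toDigitsCore_eq (n : Nat) : ∀ (f : Nat) (l : List Char), n < f →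
    Nat.toDigitsCore 10 f n l = digitChars n ++ l := by
  induction n using Nat.strong_induction_on with
  | _ n ih =>
    intro f l hf
    match f with
    | f' + 1 =>
      rw [Nat.toDigitsCore]
      by_cases h0 : n / 10 = 0
      · simp [h0, digitChars]
      · have hd : n / 10 < n := Nat.div_lt_self (by omega) (by omega)
        simp only [if_neg h0]
        rw [ih (n / 10) hd f' _ (by omega)]
        conv_rhs => rw [digitChars, if_neg h0]
        simp

lemma toDigits_eq (m : Nat) : Nat.toDigits 10 m = digitChars m := by
  have := toDigitsCore_eq m (m + 1) [] (by omega)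
  simpa [Nat.toDigits] using this

lemma digitChar_val (d : Nat) (hd : d < 10) :
    ((Nat.digitChar d).toNat : Int) - 48 = (d : Int) := by
  interval_cases d <;> decide

lemma map_digitChars (m : Nat) (hm : 0 < m) :
    (digitChars m).map (fun c => ((c.toNat : Int) - 48)) = (digitsLow m).reverse := by
  induction m using Nat.strong_induction_on with
  | _ m ih =>
    rw [digitChars]
    by_cases h0 : m / 10 = 0
    · rw [if_pos h0]
      conv_rhs => rw [digitsLow, if_neg (by omega), digitsLow, if_pos h0]
      simp [digitChar_val _ (Nat.mod_lt _ (by omega))]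
    · have hd : m / 10 < m := Nat.div_lt_self (by omega) (by omega)
      rw [if_neg h0, List.map_append, ih (m / 10) hd (by omega)]
      conv_rhs => rw [digitsLow, if_neg (by omega)]
      simp [digitChar_val _ (Nat.mod_lt _ (by omega))]

lemma altSum_append (xs ys : List Int) :
    altSum (xs ++ ys) =
      altSum xs + (if xs.length % 2 = 0 then altSum ys else -altSum ys) := by
  induction xs with
  | nil => simp [altSum]
  | cons d ds ihd =>
    simp only [List.cons_append, altSum, ihd, List.length_cons]
    rcases Nat.mod_two_eq_zero_or_one ds.length with h | h
    · rw [if_pos h, if_neg (by omega)]; ring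
    · rw [if_neg (by omega), if_pos (by omega)]; ring

lemma altSum_reverse (l : List Int) :
    altSum l.reverse = if l.length % 2 = 1 then altSum l else -altSum l := by
  induction l with
  | nil => simp [altSum]
  | cons d ds ihd =>
    rw [List.reverse_cons, altSum_append, ihd]
    simp only [altSum, List.length_reverse, List.length_cons]
    rcases Nat.mod_two_eq_zero_or_one ds.length with h | h
    · rw [if_neg (by omega), if_pos h, if_pos (by omega)]
      ring
    · rw [if_pos h, if_neg (by omega), if_neg (by omega)]
      ring

lemma solLoop_eq (m : Nat) : ∀ (res cnt sign : Int), 0 ≤ cnt →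
    solLoop (m : Int) res cnt sign =
      (if PySem.Int.mod (cnt + (digitsLow m).length) 2 ≠ 0
       then res + sign * altSum (digitsLow m)
       else -(res + sign * altSum (digitsLow m))) := by
  induction m using Nat.strong_induction_on with
  | _ m ih =>
    intro res cnt sign hcnt
    by_cases hm : m = 0
    · subst hm
      rw [solLoop, digitsLow]
      simp [altSum, PySem.Int.band_one]
    · have hpos : (0 : Int) < (m : Int) := by exact_mod_cast Nat.pos_of_ne_zero hm
      have hd : m / 10 < m := Nat.div_lt_self (by omega) (by omega)
      have hfd : PySem.Int.floordiv (m : Int) 10 = ((m / 10 : Nat) : Int) := by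
        exact_mod_cast PySem.Int.floordiv_natCast m 10
      have hmd : PySem.Int.mod (m : Int) 10 = ((m % 10 : Nat) : Int) := by
        exact_mod_cast PySem.Int.mod_natCast m 10
      rw [solLoop, dif_pos hpos, hfd, hmd, ih (m / 10) hd _ _ _ (by omega)]
      conv_rhs => rw [digitsLow, if_neg hm]
      simp only [altSum, List.length_cons]
      push_cast
      have hlenp : cnt + 1 + ((digitsLow (m / 10)).length : Int)
          = cnt + (((digitsLow (m / 10)).length : Int) + 1) := by ring
      rw [hlenp]
      split <;> ring

lemma enumFold (g : Char → Int) (cs : List Char) : ∀ (s a : Int), 0 ≤ s →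
    (PySem.List.enumerate cs s).foldl
      (fun total p => total + (if PySem.Int.mod p.1 2 = 0 then g p.2 else -(g p.2))) a
    = a + (if PySem.Int.mod s 2 = 0 then altSum (cs.map g) else -(altSum (cs.map g))) := by
  induction cs with
  | nil => intro s a _; simp [PySem.List.enumerate_nil, altSum]
  | cons c cs ihc =>
    intro s a hs
    rw [PySem.List.enumerate_cons, List.foldl_cons, ihc (s + 1) _ (by omega)]
    simp only [List.map_cons, altSum]
    rw [PySem.Int.mod_eq_emod_of_pos (a := s) (by omega : (0:Int) < 2),
      PySem.Int.mod_eq_emod_of_pos (a := s + 1) (by omega : (0:Int) < 2)]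
    by_cases hp : s % 2 = 0
    · rw [if_pos hp, if_pos hp, if_neg (by omega)]; ring
    · rw [if_neg hp, if_neg hp, if_pos (by omega)]; ring

lemma solution_alt_eq (m : Nat) (hm : 0 < m) :
    solution_alt (m : Int) = altSum ((digitsLow m).reverse) := by
  unfold solution_alt
  have hneg : ¬ ((m : Int) < 0) := by omega
  rw [PySem.Int.toList_toStr]
  have hch : PySem.Int.toChars (m : Int) = digitChars m := by
    simp only [PySem.Int.toChars, if_neg hneg, Int.toNat_natCast]
    exact toDigits_eq m
  rw [hch, enumFold (fun c => ((c.toNat : Int) - 48)) _ 0 0 (by omega)]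
  rw [map_digitChars m hm]
  simp [PySem.Int.mod]

-- ===== VERDICT (by name: the statement is the Claim_ definition above) =====
theorem solution_spec : Claim_equal_solution := by
  intro n _ hpre
  unfold Pre_solution at hpre
  unfold Spec_solution solution
  obtain ⟨m, rfl⟩ : ∃ m : Nat, n = (m : Int) := ⟨n.toNat, by omega⟩
  by_cases hm : m = 0
  · subst hm
    rw [solLoop]
    decide
  · have hm' : 0 < m := Nat.pos_of_ne_zero hm
    rw [solLoop_eq m 0 0 1 (by omega), solution_alt_eq m hm',
      altSum_reverse (digitsLow m)]
    rw [PySem.Int.mod_eq_emod_of_pos (by omega : (0:Int) < 2)]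
    have : ((0 : Int) + (digitsLow m).length) % 2 = ((digitsLow m).length % 2 : Nat) := by
      push_cast; omega
    rw [this]
    by_cases hp : (digitsLow m).length % 2 = 1
    · rw [if_pos hp]
      rw [if_pos (by exact_mod_cast by omega)]
      ring
    · rw [if_neg hp]
      rw [if_neg (by exact_mod_cast by omega)]
      ring
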